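-- pv_equiv track=rewrite | github.com/syrin-labs/syrin-integrations | agoragentic/examples/micro_ecf_policy_pack.py | required_evidence_for_terms
-- ===== SOURCE A (Python) =====
-- def default_review_gates() -> dict[str, list[str]]:
--     """Return evidence requirements for sensitive action classes."""
--     return {
--         "live_spend": ["match_preview", "budget_remaining", "human_approval", "receipt_required"],
--         "deployment": ["sandbox_passed", "rollback_plan", "human_approval"],
--         "memory_write": ["source_provenance", "reviewed_content", "rollback_key"],
--         "secret_access": ["declared_secret_label", "least_privilege_reason", "human_approval"],
--         "external_message": ["recipient_scope", "message_preview", "rate_limit", "human_approval"],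
--         "budget_change": ["current_allocation", "new_allocation", "reason", "audit_log"],
--     }
--
-- def required_evidence_for_terms(sensitive_terms: list[str]) -> list[str]:
--     """Map sensitive action terms to Micro ECF evidence requirements."""
--     evidence: list[str] = []
--     if any(term in sensitive_terms for term in ("execute live", "spend", "pay", "settle")):
--         evidence.extend(default_review_gates()["live_spend"])
--     if "deploy" in sensitive_terms:
--         evidence.extend(default_review_gates()["deployment"])
--     if "write memory" in sensitive_terms:
--         evidence.extend(default_review_gates()["memory_write"])
--     if any(term in sensitive_terms for term in ("store secret", "retrieve secret")):
--         evidence.extend(default_review_gates()["secret_access"])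
--     if any(term in sensitive_terms for term in ("send email", "post outreach")):
--         evidence.extend(default_review_gates()["external_message"])
--     if "change budget" in sensitive_terms:
--         evidence.extend(default_review_gates()["budget_change"])
--     return sorted(set(evidence))
-- ===== SOURCE B (Python) =====
-- def default_review_gates() -> dict[str, list[str]]:
--     """Return evidence requirements for sensitive action classes."""
--     return {
--         "live_spend": ["match_preview", "budget_remaining", "human_approval", "receipt_required"],
--         "deployment": ["sandbox_passed", "rollback_plan", "human_approval"],
--         "memory_write": ["source_provenance", "reviewed_content", "rollback_key"],
--         "secret_access": ["declared_secret_label", "least_privilege_reason", "human_approval"],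
--         "external_message": ["recipient_scope", "message_preview", "rate_limit", "human_approval"],
--         "budget_change": ["current_allocation", "new_allocation", "reason", "audit_log"],
--     }
--
-- _GATE_FOR_TERM = {
--     "execute live": "live_spend",
--     "spend": "live_spend",
--     "pay": "live_spend",
--     "settle": "live_spend",
--     "deploy": "deployment",
--     "write memory": "memory_write",
--     "store secret": "secret_access",
--     "retrieve secret": "secret_access",
--     "send email": "external_message",
--     "post outreach": "external_message",
--     "change budget": "budget_change",
-- }
--
-- def required_evidence_for_terms(sensitive_terms: list[str]) -> list[str]:
--     """Map sensitive action terms to Micro ECF evidence requirements."""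
--     gates = default_review_gates()
--     evidence: list[str] = []
--     for term in sensitive_terms:
--         gate = _GATE_FOR_TERM.get(term)
--         if gate is not None:
--             evidence.extend(gates[gate])
--     return sorted(set(evidence))
-- ===== Notes on version B (the rewrite author's own statement) =====
-- stated objective: idiomatic
-- what changed: Replaces the six hard-coded membership branches (each scanning the input list) with a static term-to-gate lookup table driving a single pass over the input terms.
import Mathlib
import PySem

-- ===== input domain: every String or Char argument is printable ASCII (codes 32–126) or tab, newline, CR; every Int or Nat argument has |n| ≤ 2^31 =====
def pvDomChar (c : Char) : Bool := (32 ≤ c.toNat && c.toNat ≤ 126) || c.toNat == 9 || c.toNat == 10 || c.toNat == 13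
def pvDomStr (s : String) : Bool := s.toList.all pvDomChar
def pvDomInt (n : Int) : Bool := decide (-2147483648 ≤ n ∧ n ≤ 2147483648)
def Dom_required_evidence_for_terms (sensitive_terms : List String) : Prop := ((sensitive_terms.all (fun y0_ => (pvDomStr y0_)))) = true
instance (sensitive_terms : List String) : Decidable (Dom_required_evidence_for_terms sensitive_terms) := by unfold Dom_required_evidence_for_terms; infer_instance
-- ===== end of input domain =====

-- B replaces A's six hard-coded membership branches with a static term→gate table
-- driving a single pass over the input terms (idiomatic; return value identical).


-- ===== PORT A =====
-- keys are pairwise distinct, so the dict literal is Dict.ofList of the pairs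
def default_review_gates : PySem.Dict String (List String) :=
  PySem.Dict.ofList
  [("live_spend", ["match_preview", "budget_remaining", "human_approval", "receipt_required"]),
   ("deployment", ["sandbox_passed", "rollback_plan", "human_approval"]),
   ("memory_write", ["source_provenance", "reviewed_content", "rollback_key"]),
   ("secret_access", ["declared_secret_label", "least_privilege_reason", "human_approval"]),
   ("external_message", ["recipient_scope", "message_preview", "rate_limit", "human_approval"]),
   ("budget_change", ["current_allocation", "new_allocation", "reason", "audit_log"])]

-- d[k]: every looked-up key is present in the literal dict, so getD [] is exact (the default is never taken)
def required_evidence_for_terms (sensitive_terms : List String) : List String :=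
  let evidence : List String := []
  let evidence := if ["execute live", "spend", "pay", "settle"].any (fun term => sensitive_terms.contains term)
    then evidence ++ PySem.Dict.getD default_review_gates "live_spend" [] else evidence
  let evidence := if sensitive_terms.contains "deploy"
    then evidence ++ PySem.Dict.getD default_review_gates "deployment" [] else evidence
  let evidence := if sensitive_terms.contains "write memory"
    then evidence ++ PySem.Dict.getD default_review_gates "memory_write" [] else evidence
  let evidence := if ["store secret", "retrieve secret"].any (fun term => sensitive_terms.contains term)
    then evidence ++ PySem.Dict.getD default_review_gates "secret_access" [] else evidence
  let evidence := if ["send email", "post outreach"].any (fun term => sensitive_terms.contains term)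
    then evidence ++ PySem.Dict.getD default_review_gates "external_message" [] else evidence
  let evidence := if sensitive_terms.contains "change budget"
    then evidence ++ PySem.Dict.getD default_review_gates "budget_change" [] else evidence
  PySem.List.sorted (PySem.Set.ofList evidence) (fun x => x) false

-- ===== PORT B =====
def pv_gate_for_term : PySem.Dict String String :=
  PySem.Dict.ofList
  [("execute live", "live_spend"), ("spend", "live_spend"), ("pay", "live_spend"), ("settle", "live_spend"),
   ("deploy", "deployment"),
   ("write memory", "memory_write"),
   ("store secret", "secret_access"), ("retrieve secret", "secret_access"),
   ("send email", "external_message"), ("post outreach", "external_message"),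
   ("change budget", "budget_change")]

def required_evidence_for_terms_alt (sensitive_terms : List String) : List String :=
  let gates := default_review_gates
  let evidence := sensitive_terms.foldl (fun acc term =>
    match PySem.Dict.get? pv_gate_for_term term with
    | some gate => acc ++ PySem.Dict.getD gates gate []
    | none => acc) []
  PySem.List.sorted (PySem.Set.ofList evidence) (fun x => x) false

-- ===== PRECONDITION & SPEC =====
def Spec_required_evidence_for_terms (sensitive_terms : List String) (out : List String) : Prop := out = required_evidence_for_terms_alt sensitive_terms
instance (sensitive_terms : List String) (out : List String) : Decidable (Spec_required_evidence_for_terms sensitive_terms out) := by unfold Spec_required_evidence_for_terms; infer_instance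

-- ===== CLAIM (what is proved, stated in full; the proofs are below) =====
def Claim_equal_required_evidence_for_terms : Prop := ∀ (sensitive_terms : List String), Dom_required_evidence_for_terms sensitive_terms → Spec_required_evidence_for_terms sensitive_terms (required_evidence_for_terms sensitive_terms)

-- ===== LEMMAS AND PROOFS =====

-- evidence contributed by one term in B's single pass
def pvEvOf (term : String) : List String :=
  match PySem.Dict.get? pv_gate_for_term term with
  | some gate => PySem.Dict.getD default_review_gates gate []
  | none => []

-- A's accumulated evidence list (the nested-if chain of the port, named for the proof)
def pvEvA (ts : List String) : List String :=
  let evidence : List String := []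
  let evidence := if ["execute live", "spend", "pay", "settle"].any (fun term => ts.contains term)
    then evidence ++ PySem.Dict.getD default_review_gates "live_spend" [] else evidence
  let evidence := if ts.contains "deploy"
    then evidence ++ PySem.Dict.getD default_review_gates "deployment" [] else evidence
  let evidence := if ts.contains "write memory"
    then evidence ++ PySem.Dict.getD default_review_gates "memory_write" [] else evidence
  let evidence := if ["store secret", "retrieve secret"].any (fun term => ts.contains term)
    then evidence ++ PySem.Dict.getD default_review_gates "secret_access" [] else evidence
  let evidence := if ["send email", "post outreach"].any (fun term => ts.contains term)
    then evidence ++ PySem.Dict.getD default_review_gates "external_message" [] else evidence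
  if ts.contains "change budget"
    then evidence ++ PySem.Dict.getD default_review_gates "budget_change" [] else evidence

theorem pvA_eq (ts : List String) :
    required_evidence_for_terms ts
      = PySem.List.sorted (PySem.Set.ofList (pvEvA ts)) (fun x => x) false := rfl

theorem pvB_eq (ts : List String) :
    required_evidence_for_terms_alt ts
      = PySem.List.sorted (PySem.Set.ofList (ts.flatMap pvEvOf)) (fun x => x) false := by
  unfold required_evidence_for_terms_alt
  have h : (ts.foldl (fun acc term =>
      match PySem.Dict.get? pv_gate_for_term term with
      | some gate => acc ++ PySem.Dict.getD default_review_gates gate []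
      | none => acc) ([] : List String)) = ts.foldl (fun acc term => acc ++ pvEvOf term) [] := by
    apply PySem.List.foldl_congr_mem
    intro acc t _
    unfold pvEvOf
    cases PySem.Dict.get? pv_gate_for_term t <;> simp
  simp only [h, PySem.List.foldl_append_eq_flatMap, List.nil_append]

set_option maxHeartbeats 1000000 in
theorem pvMem_evOf (t x : String) :
    x ∈ pvEvOf t ↔
      ((t = "execute live" ∨ t = "spend" ∨ t = "pay" ∨ t = "settle") ∧
         x ∈ PySem.Dict.getD default_review_gates "live_spend" []) ∨
      (t = "deploy" ∧ x ∈ PySem.Dict.getD default_review_gates "deployment" []) ∨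
      (t = "write memory" ∧ x ∈ PySem.Dict.getD default_review_gates "memory_write" []) ∨
      ((t = "store secret" ∨ t = "retrieve secret") ∧
         x ∈ PySem.Dict.getD default_review_gates "secret_access" []) ∨
      ((t = "send email" ∨ t = "post outreach") ∧
         x ∈ PySem.Dict.getD default_review_gates "external_message" []) ∨
      (t = "change budget" ∧ x ∈ PySem.Dict.getD default_review_gates "budget_change" []) := by
  have hd : pv_gate_for_term = PySem.Dict.mk
      [("execute live", "live_spend"), ("spend", "live_spend"), ("pay", "live_spend"), ("settle", "live_spend"),
       ("deploy", "deployment"), ("write memory", "memory_write"),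
       ("store secret", "secret_access"), ("retrieve secret", "secret_access"),
       ("send email", "external_message"), ("post outreach", "external_message"),
       ("change budget", "budget_change")] := rfl
  unfold pvEvOf
  rw [hd]
  simp only [PySem.Dict.get?_mk_cons, beq_iff_eq]
  split_ifs <;> simp_all [PySem.Dict.get?, eq_comm]

theorem pvMem_evA (ts : List String) (x : String) :
    x ∈ pvEvA ts ↔
      (("execute live" ∈ ts ∨ "spend" ∈ ts ∨ "pay" ∈ ts ∨ "settle" ∈ ts) ∧
         x ∈ PySem.Dict.getD default_review_gates "live_spend" []) ∨
      ("deploy" ∈ ts ∧ x ∈ PySem.Dict.getD default_review_gates "deployment" []) ∨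
      ("write memory" ∈ ts ∧ x ∈ PySem.Dict.getD default_review_gates "memory_write" []) ∨
      (("store secret" ∈ ts ∨ "retrieve secret" ∈ ts) ∧
         x ∈ PySem.Dict.getD default_review_gates "secret_access" []) ∨
      (("send email" ∈ ts ∨ "post outreach" ∈ ts) ∧
         x ∈ PySem.Dict.getD default_review_gates "external_message" []) ∨
      ("change budget" ∈ ts ∧ x ∈ PySem.Dict.getD default_review_gates "budget_change" []) := by
  unfold pvEvA
  simp only [List.any_cons, List.any_nil, List.contains_eq_mem, Bool.or_eq_true,
    decide_eq_true_eq]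
  split_ifs <;> simp_all

set_option maxHeartbeats 1000000 in
theorem pvMem_evB (ts : List String) (x : String) :
    x ∈ ts.flatMap pvEvOf ↔ x ∈ pvEvA ts := by
  rw [List.mem_flatMap, pvMem_evA]
  constructor
  · rintro ⟨t, ht, hx⟩
    rw [pvMem_evOf] at hx
    rcases hx with ⟨he, hm⟩ | ⟨he, hm⟩ | ⟨he, hm⟩ | ⟨he, hm⟩ | ⟨he, hm⟩ | ⟨he, hm⟩ <;>
      [ (rcases he with h | h | h | h <;> subst h); subst he; subst he;
        (rcases he with h | h <;> subst h); (rcases he with h | h <;> subst h); subst he ] <;>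
      tauto
  · rintro (⟨he, hm⟩ | ⟨he, hm⟩ | ⟨he, hm⟩ | ⟨he, hm⟩ | ⟨he, hm⟩ | ⟨he, hm⟩)
    · rcases he with h | h | h | h <;> exact ⟨_, h, by rw [pvMem_evOf]; tauto⟩
    · exact ⟨_, he, by rw [pvMem_evOf]; tauto⟩
    · exact ⟨_, he, by rw [pvMem_evOf]; tauto⟩
    · rcases he with h | h <;> exact ⟨_, h, by rw [pvMem_evOf]; tauto⟩
    · rcases he with h | h <;> exact ⟨_, h, by rw [pvMem_evOf]; tauto⟩
    · exact ⟨_, he, by rw [pvMem_evOf]; tauto⟩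

-- ===== VERDICT (by name: the statement is the Claim_ definition above) =====
theorem required_evidence_for_terms_spec : Claim_equal_required_evidence_for_terms := by
  intro ts _
  unfold Spec_required_evidence_for_terms
  rw [pvA_eq, pvB_eq]
  apply PySem.List.sorted_eq_sorted_of_perm
  · exact fun a b h => h
  · rw [List.perm_ext_iff_of_nodup (PySem.Set.nodup_ofList _) (PySem.Set.nodup_ofList _)]
    intro x
    simp only [PySem.Set.mem_ofList]
    exact (pvMem_evB ts x).symm
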